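-- pv_equiv track=rewrite | github.com/Wyatt-Cox-student/SDEV265-Project | test.py | should_refresh_media_items
-- ===== SOURCE A (Python) =====
-- def should_refresh_media_items(media_items):
--     if not media_items:
--         return True
--
--
--     labels = " ".join(
--         (item.get("label") or "").lower()
--         for item in media_items
--         if isinstance(item, dict)
--     )
--
--
--     has_title_screen = any(
--         keyword in labels
--         for keyword in ("title", "titlescreen", "title screen")
--     )
--
--
--     return len(media_items) < 4 or not has_title_screen
-- ===== SOURCE B (Python) =====
-- def should_refresh_media_items(media_items):
--     # All three keywords contain "title" as a prefix, and "title" has no space,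
--     # so it can never straddle the " " join separator: check each label directly.
--     if len(media_items) < 4:
--         return True
--     return not any(
--         isinstance(item, dict) and "title" in (item.get("label") or "").lower()
--         for item in media_items
--     )
-- ===== Notes on version B (the rewrite author's own statement) =====
-- stated objective: simpler
-- what changed: B drops the joined-string build and the three-keyword scan: since every keyword reduces to the spaceless substring "title", which cannot straddle the " " join separator, B checks each label directly with a single per-item substring test and folds the empty-input case into len<4.
import Mathlib
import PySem

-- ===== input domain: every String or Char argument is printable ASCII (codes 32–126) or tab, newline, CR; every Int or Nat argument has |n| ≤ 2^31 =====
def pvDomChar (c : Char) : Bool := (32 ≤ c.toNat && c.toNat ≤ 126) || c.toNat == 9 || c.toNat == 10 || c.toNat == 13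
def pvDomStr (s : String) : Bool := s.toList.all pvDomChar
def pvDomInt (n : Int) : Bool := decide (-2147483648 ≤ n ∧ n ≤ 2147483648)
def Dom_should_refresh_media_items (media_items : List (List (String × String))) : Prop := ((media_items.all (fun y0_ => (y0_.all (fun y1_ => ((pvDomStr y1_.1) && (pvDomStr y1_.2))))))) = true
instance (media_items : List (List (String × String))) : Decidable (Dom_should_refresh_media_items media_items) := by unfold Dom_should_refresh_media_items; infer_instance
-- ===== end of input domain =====

-- B replaces the joined-string + three-keyword scan by a single per-label "title" substring test (objective: simpler).


-- ===== PORT A =====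
def should_refresh_media_items (media_items : List (List (String × String))) : Bool :=
  if media_items = [] then true
  else
    -- the 'isinstance(item, dict)' filter keeps every item: all items are dicts under this type
    let labels := PySem.Str.join " " (media_items.map (fun item =>
      PySem.Str.lower (((PySem.Dict.mk item).get? "label").getD "")))
    let has_title_screen := ["title", "titlescreen", "title screen"].any
      (fun keyword => PySem.Str.isIn keyword labels)
    decide (PySem.List.len media_items < 4) || !has_title_screen

-- ===== PORT B =====
def should_refresh_media_items_alt (media_items : List (List (String × String))) : Bool :=
  if PySem.List.len media_items < 4 then true
  else
    !(media_items.any (fun item =>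
      PySem.Str.isIn "title" (PySem.Str.lower (((PySem.Dict.mk item).get? "label").getD ""))))

-- ===== PRECONDITION & SPEC =====
def Spec_should_refresh_media_items (media_items : List (List (String × String))) (out : Bool) : Prop := out = should_refresh_media_items_alt media_items
instance (media_items : List (List (String × String))) (out : Bool) : Decidable (Spec_should_refresh_media_items media_items out) := by unfold Spec_should_refresh_media_items; infer_instance

-- ===== CLAIM (what is proved, stated in full; the proofs are below) =====
def Claim_equal_should_refresh_media_items : Prop := ∀ (media_items : List (List (String × String))), Dom_should_refresh_media_items media_items → Spec_should_refresh_media_items media_items (should_refresh_media_items media_items)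

-- ===== LEMMAS AND PROOFS =====

lemma pv_prefix_append_cons {c : Char} {p a b : List Char} (hc : c ∉ p) :
    p <+: a ++ c :: b ↔ p <+: a := by
  constructor
  · intro h
    induction a generalizing p with
    | nil =>
      cases p with
      | nil => exact List.nil_prefix
      | cons x p' =>
        rcases List.cons_prefix_cons.mp h with ⟨rfl, _⟩
        exact absurd (List.mem_cons_self) hc
    | cons z a' ih =>
      cases p with
      | nil => exact List.nil_prefix
      | cons x p' =>
        rcases List.cons_prefix_cons.mp h with ⟨rfl, h'⟩
        exact List.cons_prefix_cons.mpr ⟨rfl, ih (fun hm => hc (List.mem_cons_of_mem _ hm)) h'⟩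
  · intro h
    exact h.trans (List.prefix_append _ _)

lemma pv_infix_append_cons {c : Char} {p a b : List Char} (hc : c ∉ p) (hp : p ≠ []) :
    p <:+: a ++ c :: b ↔ p <:+: a ∨ p <:+: b := by
  induction a with
  | nil =>
    simp only [List.nil_append]
    rw [List.infix_cons_iff]
    constructor
    · rintro (h | h)
      · cases p with
        | nil => exact absurd rfl hp
        | cons x p' =>
          rcases List.cons_prefix_cons.mp h with ⟨rfl, _⟩
          exact absurd (List.mem_cons_self) hc
      · exact Or.inr h
    · rintro (h | h)
      · exact absurd (List.eq_nil_of_infix_nil h) hp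
      · exact Or.inr h
  | cons z a' ih =>
    rw [List.cons_append, List.infix_cons_iff, List.infix_cons_iff]
    constructor
    · rintro (h | h)
      · left; left
        exact (pv_prefix_append_cons (a := z :: a') hc).mp h
      · rcases ih.mp h with h' | h'
        · exact Or.inl (Or.inr h')
        · exact Or.inr h'
    · rintro ((h | h) | h)
      · left; exact (pv_prefix_append_cons (a := z :: a') hc).mpr h
      · right; exact ih.mpr (Or.inl h)
      · right; exact ih.mpr (Or.inr h)

lemma pv_infix_join {p : List Char} (parts : List (List Char)) (hc : ' ' ∉ p) (hp : p ≠ []) :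
    p <:+: PySem.Chars.join [' '] parts ↔ ∃ l ∈ parts, p <:+: l := by
  induction parts with
  | nil =>
    simp [PySem.Chars.join_nil]
    intro h
    exact hp h
  | cons x xs ih =>
    cases xs with
    | nil => simp [PySem.Chars.join_singleton]
    | cons y ys =>
      rw [PySem.Chars.join_cons_cons, List.append_assoc, List.singleton_append,
        pv_infix_append_cons hc hp, ih]
      simp


lemma pv_has_eq (mi : List (List (String × String))) :
    (["title", "titlescreen", "title screen"].any
      (fun keyword => PySem.Str.isIn keyword (PySem.Str.join " " (mi.map (fun item => PySem.Str.lower (((PySem.Dict.mk item).get? "label").getD "")))))) =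
    (mi.any (fun item => PySem.Str.isIn "title" ((fun item => PySem.Str.lower (((PySem.Dict.mk item).get? "label").getD "")) item))) := by
  set labels := PySem.Str.join " " (mi.map (fun item => PySem.Str.lower (((PySem.Dict.mk item).get? "label").getD ""))) with hl
  have key : PySem.Str.isIn "title" labels = (mi.any (fun item => PySem.Str.isIn "title" ((fun item => PySem.Str.lower (((PySem.Dict.mk item).get? "label").getD "")) item))) := by
    rw [Bool.eq_iff_iff, PySem.Str.isIn_iff_infix, List.any_eq_true]
    have : labels.toList = PySem.Chars.join [' '] ((mi.map (fun item => PySem.Str.lower (((PySem.Dict.mk item).get? "label").getD ""))).map String.toList) := by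
      simp [hl, PySem.Str.toList_join]
    rw [this, pv_infix_join _ (by decide) (by decide)]
    simp [PySem.Chars.isIn_iff_infix]
  have habs : ∀ k : String, ("title".toList <+: k.toList) →
      PySem.Str.isIn k labels = true → PySem.Str.isIn "title" labels = true := by
    intro k hpre hk
    rw [PySem.Str.isIn_iff_infix] at hk ⊢
    exact hpre.isInfix.trans hk
  simp only [List.any_cons, List.any_nil, Bool.or_false]
  cases hA : mi.any (fun item => PySem.Str.isIn "title" ((fun item => PySem.Str.lower (((PySem.Dict.mk item).get? "label").getD "")) item)) with
  | true => rw [key, hA]; simp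
  | false =>
    have h1 : PySem.Str.isIn "title" labels = false := by rw [key, hA]
    have h2 : PySem.Str.isIn "titlescreen" labels = false := by
      cases h : PySem.Str.isIn "titlescreen" labels
      · rfl
      · rw [habs "titlescreen" (by decide) h] at h1; exact h1
    have h3 : PySem.Str.isIn "title screen" labels = false := by
      cases h : PySem.Str.isIn "title screen" labels
      · rfl
      · rw [habs "title screen" (by decide) h] at h1; exact h1
    rw [h1, h2, h3]; simp

-- ===== VERDICT (by name: the statement is the Claim_ definition above) =====
theorem should_refresh_media_items_spec : Claim_equal_should_refresh_media_items := by
  intro mi _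
  unfold Spec_should_refresh_media_items should_refresh_media_items should_refresh_media_items_alt
  by_cases hnil : mi = []
  · subst hnil; decide
  · rw [if_neg hnil]
    by_cases h4 : PySem.List.len mi < 4
    · rw [if_pos h4, decide_eq_true h4, Bool.true_or]
    · rw [if_neg h4]
      simp only [decide_eq_false h4, Bool.false_or]
      rw [pv_has_eq]
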